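-- pv_equiv track=rewrite | github.com/Linksy77/Python-Code | MusicRecommenderProject/musicrecplus.py | mostArtists
-- ===== SOURCE A (Python) =====
-- def mostArtists(userMap):
--     '''Returns user with the most artists, one per line
--         Author: Belal'''
--     maxLen = 0
--     user = []
--     for userName, lst in userMap.items():
--         if userName[-1] != '$' and len(lst) == maxLen:
--             user.append(userName)
--         elif userName[-1] != '$' and len(lst) > maxLen:
--             maxLen = len(lst)
--             user = [userName]
--     return user
-- ===== SOURCE B (Python) =====
-- def mostArtists(userMap):
--     '''Returns user with the most artists, one per line'''
--     maxLen = max((len(lst) for name, lst in userMap.items()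
--                   if not name.endswith('$')), default=0)
--     return [name for name, lst in userMap.items()
--             if not name.endswith('$') and len(lst) == maxLen]
-- ===== Notes on version B (the rewrite author's own statement) =====
-- stated objective: simpler
-- what changed: Replaces A's single stateful scan (running maxLen with append-or-reset of the accumulator list) by a two-pass decomposition: first compute the maximum artist count over valid users (default 0), then one comprehension collecting every valid user with exactly that count, in order.
import Mathlib
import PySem

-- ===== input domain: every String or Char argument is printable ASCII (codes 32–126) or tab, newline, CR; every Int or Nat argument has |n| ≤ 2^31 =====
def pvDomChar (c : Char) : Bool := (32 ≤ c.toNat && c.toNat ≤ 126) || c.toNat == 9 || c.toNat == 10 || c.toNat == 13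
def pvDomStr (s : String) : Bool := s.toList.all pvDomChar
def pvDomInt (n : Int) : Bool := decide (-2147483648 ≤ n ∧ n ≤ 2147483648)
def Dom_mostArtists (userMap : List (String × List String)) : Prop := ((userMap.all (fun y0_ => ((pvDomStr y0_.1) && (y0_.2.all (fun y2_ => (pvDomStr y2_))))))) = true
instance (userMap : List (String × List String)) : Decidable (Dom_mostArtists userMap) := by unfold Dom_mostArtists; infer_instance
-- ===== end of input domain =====

-- B changes the decomposition only (one stateful scan → max pass then filter pass); equivalence on maps whose user names are nonempty (A raises IndexError otherwise).

-- ===== PORT A =====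
-- A's loop body: userName[-1] via PySem.Str.pyGet?; 'none' (IndexError) is excluded by Pre_ below.
def pvStepA (s : Nat × List String) (p : String × List String) : Nat × List String :=
  match PySem.Str.pyGet? p.1 (-1) with
  | none => s   -- unreachable under Pre_mostArtists (Python raises IndexError here)
  | some c =>
    if c ≠ '$' ∧ p.2.length = s.1 then (s.1, s.2 ++ [p.1])
    else if c ≠ '$' ∧ p.2.length > s.1 then (p.2.length, [p.1])
    else s

def mostArtists (userMap : List (String × List String)) : List String :=
  (userMap.foldl pvStepA (0, [])).2

-- ===== PORT B =====
def mostArtists_alt (userMap : List (String × List String)) : List String :=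
  let maxLen : Nat :=
    ((userMap.filter (fun p => !(PySem.Str.endswith p.1 "$"))).map (fun p => p.2.length)).foldl max 0
  (userMap.filter (fun p => !(PySem.Str.endswith p.1 "$") && p.2.length == maxLen)).map (fun p => p.1)

-- ===== PRECONDITION & SPEC =====
-- Pre_ excludes maps containing an empty user name: there Python A raises IndexError at userName[-1].
def Pre_mostArtists (userMap : List (String × List String)) : Prop :=
  ∀ p ∈ userMap, p.1.toList ≠ []
instance (userMap : List (String × List String)) : Decidable (Pre_mostArtists userMap) := by
  unfold Pre_mostArtists; infer_instance

def pvWitness_mostArtists : (List (String × List String)) :=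
  [("a", ["x"]), ("b$", ["y", "z"]), ("c", ["x"])]

def Spec_mostArtists (userMap : List (String × List String)) (out : List String) : Prop := out = mostArtists_alt userMap
instance (userMap : List (String × List String)) (out : List String) : Decidable (Spec_mostArtists userMap out) := by unfold Spec_mostArtists; infer_instance

-- ===== CLAIM (what is proved, stated in full; the proofs are below) =====
def Claim_equal_mostArtists : Prop := ∀ (userMap : List (String × List String)), Dom_mostArtists userMap → Pre_mostArtists userMap → Spec_mostArtists userMap (mostArtists userMap)

-- ===== LEMMAS AND PROOFS =====

-- proof-side vocabulary
def pvValid (p : String × List String) : Bool := !(PySem.Str.endswith p.1 "$")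
def pvM (m : List (String × List String)) (k : Nat) : Nat :=
  m.foldl (fun a p => if pvValid p then max a p.2.length else a) k
def pvC (m : List (String × List String)) (t : Nat) : List String :=
  (m.filter (fun p => pvValid p && p.2.length == t)).map (fun p => p.1)
-- A's step rewritten with pvValid (equal under Pre_)
def pvStepA' (s : Nat × List String) (p : String × List String) : Nat × List String :=
  if pvValid p then
    (if p.2.length = s.1 then (s.1, s.2 ++ [p.1])
     else if p.2.length > s.1 then (p.2.length, [p.1]) else s)
  else s

theorem pv_endswith_char (s : String) (_h : s.toList ≠ []) :
    PySem.Str.endswith s "$" = true ↔ s.toList.getLast? = some '$' := by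
  rw [PySem.Str.endswith_eq, PySem.Chars.endswith_iff]
  show ("$".toList <:+ s.toList) ↔ _
  constructor
  · rintro ⟨t, ht⟩
    rw [← ht]
    simp [List.getLast?_append]
  · intro hl
    rcases List.getLast?_eq_some_iff.mp hl with ⟨ys, hys⟩
    exact ⟨ys, hys.symm⟩

theorem pv_step_eq (p : String × List String) (hp : p.1.toList ≠ []) (s : Nat × List String) :
    pvStepA s p = pvStepA' s p := by
  rcases hg : p.1.toList.getLast? with _ | c
  · exact absurd (List.getLast?_eq_none_iff.mp hg) hp
  · have hget : PySem.Str.pyGet? p.1 (-1) = some c := by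
      simp [PySem.Str.pyGet?_eq, PySem.List.pyGet?_neg_one, hg]
    unfold pvStepA pvStepA'
    rw [hget]
    by_cases hc : c = '$'
    · have hv : pvValid p = false := by
        simp only [pvValid, Bool.not_eq_false']
        exact (pv_endswith_char p.1 hp).mpr (hc ▸ hg)
      simp [hv, hc]
    · have hv : pvValid p = true := by
        simp only [pvValid, Bool.not_eq_true']
        rw [Bool.eq_false_iff]
        intro he
        exact hc ((hg ▸ (pv_endswith_char p.1 hp).mp he) |> Option.some.inj)
      simp [hv, hc]

theorem pv_le_M (m : List (String × List String)) (k : Nat) : k ≤ pvM m k := by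
  induction m generalizing k with
  | nil => simp [pvM]
  | cons p m ih =>
    simp only [pvM, List.foldl_cons]
    by_cases hv : pvValid p = true
    · calc k ≤ max k p.2.length := Nat.le_max_left _ _
        _ ≤ _ := by simpa [pvM, hv] using ih (max k p.2.length)
    · simpa [pvM, hv] using ih k

theorem pv_fold_spec (m : List (String × List String)) (k : Nat) (u : List String) :
    m.foldl pvStepA' (k, u) =
      (pvM m k, (if pvM m k = k then u else []) ++ pvC m (pvM m k)) := by
  induction m generalizing k u with
  | nil => simp [pvM, pvC]
  | cons p m ih =>
    by_cases hv : pvValid p = true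
    · have hM : pvM (p :: m) k = pvM m (max k p.2.length) := by simp [pvM, hv]
      by_cases h1 : p.2.length = k
      · have hmax : max k p.2.length = k := by omega
        have hC : ∀ t, pvC (p :: m) t =
            (if p.2.length = t then [p.1] else []) ++ pvC m t := by
          intro t; by_cases ht : p.2.length = t <;> simp [pvC, hv, ht]
        rw [List.foldl_cons]
        have hstep : pvStepA' (k, u) p = (k, u ++ [p.1]) := by
          simp [pvStepA', hv, h1]
        rw [hstep, ih, hM, hmax, hC]
        by_cases he : pvM m k = k
        · rw [he]; simp [h1]
        · have : ¬ p.2.length = pvM m k := by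
            have := pv_le_M m k; omega
          simp [he, this]
      · by_cases h2 : p.2.length > k
        · have hmax : max k p.2.length = p.2.length := by omega
          rw [List.foldl_cons]
          have hstep : pvStepA' (k, u) p = (p.2.length, [p.1]) := by
            simp [pvStepA', hv, h1, h2]
          rw [hstep, ih, hM, hmax]
          have hgeM := pv_le_M m p.2.length
          have hne : ¬ pvM m p.2.length = k := by omega
          by_cases he : pvM m p.2.length = p.2.length
          · simp [pvC, hv, he, h1]
          · have : ¬ p.2.length = pvM m p.2.length := fun h => he h.symm
            simp [pvC, hv, he, hne, this]
        · have hlt : p.2.length < k := by omega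
          have hmax : max k p.2.length = k := by omega
          rw [List.foldl_cons]
          have hstep : pvStepA' (k, u) p = (k, u) := by
            simp [pvStepA', hv, h1, h2]
          rw [hstep, ih, hM, hmax]
          have hgeM := pv_le_M m k
          have : ¬ p.2.length = pvM m k := by omega
          simp [pvC, hv, this]
    · rw [List.foldl_cons]
      have hstep : pvStepA' (k, u) p = (k, u) := by simp [pvStepA', hv]
      rw [hstep, ih]
      simp [pvM, pvC, hv]

theorem pv_maxLen_eq (m : List (String × List String)) (k : Nat) :
    ((m.filter (fun p => !(PySem.Str.endswith p.1 "$"))).map (fun p => p.2.length)).foldl max k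
      = pvM m k := by
  induction m generalizing k with
  | nil => simp [pvM]
  | cons p m ih =>
    by_cases hv : pvValid p = true
    · have : (!(PySem.Str.endswith p.1 "$")) = true := hv
      simp only [List.filter_cons, this, if_pos, List.map_cons, List.foldl_cons]
      rw [ih]
      simp [pvM, hv]
    · have : (!(PySem.Str.endswith p.1 "$")) = false := by simpa [pvValid] using hv
      simp only [List.filter_cons, this]
      rw [if_neg (by simp)]
      rw [ih]
      simp [pvM, hv]

-- ===== VERDICT (by name: the statement is the Claim_ definition above) =====
theorem mostArtists_spec : Claim_equal_mostArtists := by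
  intro m _ hpre
  unfold Spec_mostArtists mostArtists mostArtists_alt
  have hcong : m.foldl pvStepA ((0 : Nat), ([] : List String)) = m.foldl pvStepA' (0, []) :=
    PySem.List.foldl_congr_mem _ _ _ _ (fun s p hp => pv_step_eq p (hpre p hp) s)
  rw [hcong, pv_fold_spec]
  rw [← pv_maxLen_eq m 0]
  simp [pvC, pvValid]
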